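-- pv_equiv track=rewrite | github.com/lgi2p/TDwithRULES | TD_with_RULES/experiments/evaluation/performance_measures.py | get_performance_measures_single_dataitem
-- ===== SOURCE A (Python) =====
-- def get_performance_measures_single_dataitem(rank_list, ground_sol, k, performances_tot, threshold_index, ancestors):
--     # return the performance measure at different level of k for a single data item
--     general_value = False
--     punctual_value = False
--     k_max = min(len(rank_list), k)
--
--     for ind_k in range(0, k_max):
--         if rank_list[ind_k] == ground_sol:
--             for ind_app in range(ind_k, k):
--                 performances_tot[threshold_index][ind_app][0] += 1
--
--             if general_value:
--                 for ind_app in range(ind_k, k):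
--                     performances_tot[threshold_index][ind_app][1] -= 1
--             punctual_value = True
--             break
--         else:
--             if rank_list[ind_k] in ancestors[ground_sol] and not general_value and not punctual_value:
--                 for ind_app in range(ind_k, k):
--                     performances_tot[threshold_index][ind_app][1] += 1
--                 general_value = True
--         if not punctual_value and not general_value:
--             performances_tot[threshold_index][ind_k][2] += 1
--
--     if not punctual_value and not general_value:
--         if k > k_max:
--             for ind_k in range(k_max, k):
--                 performances_tot[threshold_index][ind_k][2] += 1
--
--     return performances_tot #absolute, not relative
-- ===== SOURCE B (Python) =====
-- def get_performance_measures_single_dataitem(rank_list, ground_sol, k, performances_tot, threshold_index, ancestors):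
--     # Scan once for the first exact hit p and the first ancestor hit g before it,
--     # then apply the three counter updates as direct range additions (mutates in place).
--     k_max = min(len(rank_list), k)
--
--     def bump(col, lo, hi):
--         for i in range(lo, hi):
--             performances_tot[threshold_index][i][col] += 1
--
--     p = next((i for i in range(k_max) if rank_list[i] == ground_sol), None)
--     stop = k_max if p is None else p
--     g = None
--     if stop > 0:
--         anc = ancestors[ground_sol]
--         g = next((i for i in range(stop) if rank_list[i] in anc), None)
--     if p is not None:
--         bump(0, p, k)                       # exact hit counted from rank p up to k
--     if g is not None:
--         bump(1, g, p if p is not None else k)   # ancestor hit counted from g until the exact hit (if any)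
--     end = g if g is not None else (p if p is not None else k)
--     bump(2, 0, end)                         # miss counter before the first event
--     return performances_tot
-- ===== Notes on version B (the rewrite author's own statement) =====
-- stated objective: alternative
-- what changed: A's single stateful loop with general/punctual flags, interleaved per-position updates and a +1/-1 cancellation on column 1 is replaced by one scan that finds the first exact-match position p and the first ancestor position g before it, followed by three direct range additions (col 0 over [p,k), col 1 over [g, p or k), col 2 over [0, g or p or k)).
import Mathlib
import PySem

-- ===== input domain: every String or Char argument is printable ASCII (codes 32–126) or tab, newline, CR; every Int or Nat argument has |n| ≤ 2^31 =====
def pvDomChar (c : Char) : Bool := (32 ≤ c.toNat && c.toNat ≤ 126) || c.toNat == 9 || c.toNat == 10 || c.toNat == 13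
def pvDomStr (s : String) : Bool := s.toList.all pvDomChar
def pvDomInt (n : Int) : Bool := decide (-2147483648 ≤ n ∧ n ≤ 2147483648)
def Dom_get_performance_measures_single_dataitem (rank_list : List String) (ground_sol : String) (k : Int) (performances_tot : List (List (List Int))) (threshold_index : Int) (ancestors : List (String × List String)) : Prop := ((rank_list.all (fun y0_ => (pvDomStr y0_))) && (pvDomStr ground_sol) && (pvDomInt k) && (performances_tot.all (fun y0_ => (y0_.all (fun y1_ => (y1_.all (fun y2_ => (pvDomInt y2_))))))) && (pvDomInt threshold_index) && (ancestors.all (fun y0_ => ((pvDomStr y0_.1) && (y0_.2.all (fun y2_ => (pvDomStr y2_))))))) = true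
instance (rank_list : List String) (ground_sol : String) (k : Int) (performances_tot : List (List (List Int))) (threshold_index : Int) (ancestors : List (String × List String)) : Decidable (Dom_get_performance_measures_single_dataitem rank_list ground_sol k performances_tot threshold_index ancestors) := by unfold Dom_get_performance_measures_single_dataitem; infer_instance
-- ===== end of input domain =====

-- B replaces A's stateful flag loop by one scan for the first exact / first ancestor hit
-- followed by three direct range additions (objective: alternative decomposition).
-- Both Pythons mutate performances_tot in place the same way; the theorems are about the returned value.

-- ===== PORT A =====
-- performances_tot[threshold_index][i][col] += d  (Python index semantics on the outer list;
-- an out-of-range subscript raises in Python and is excluded by Pre_, here it is a no-op)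
-- Python index resolution for the outer subscript (a negative index counts from the end)
def pvT (n : Nat) (ti : Int) : Int := if ti < 0 then ti + n else ti

def pvBump (pt : List (List (List Int))) (ti : Int) (i : Nat) (col : Nat) (d : Int) : List (List (List Int)) :=
  if 0 ≤ pvT pt.length ti ∧ pvT pt.length ti < pt.length then
    pt.modify (pvT pt.length ti).toNat (fun row => row.modify i (fun c => c.modify col (fun x => x + d)))
  else pt

-- for ind_app in range(a, b): performances_tot[threshold_index][ind_app][col] += d
def pvAddRange (pt : List (List (List Int))) (ti : Int) (col : Nat) (a b : Int) (d : Int) : List (List (List Int)) :=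
  (PySem.List.pyRange a b 1).foldl (fun pt j => pvBump pt ti j.toNat col d) pt

-- the 'for ind_k in range(0, k_max)' loop of A, with its two flags and break
def pvLoopA (gs : String) (k ti : Int) (anc : List String) :
    List String → Nat → Bool → Bool → List (List (List Int)) → Bool × Bool × List (List (List Int))
  | [], _, g, p, pt => (g, p, pt)
  | x :: rest, i, g, p, pt =>
    if x == gs then
      let pt1 := pvAddRange pt ti 0 (i : Int) k 1
      let pt2 := if g then pvAddRange pt1 ti 1 (i : Int) k (-1) else pt1
      (g, true, pt2)
    else
      let gp := if anc.contains x && !g && !p then (true, pvAddRange pt ti 1 (i : Int) k 1) else (g, pt)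
      let pt2 := if !p && !gp.1 then pvBump gp.2 ti i 2 1 else gp.2
      pvLoopA gs k ti anc rest (i + 1) gp.1 p pt2

def get_performance_measures_single_dataitem (rank_list : List String) (ground_sol : String) (k : Int) (performances_tot : List (List (List Int))) (threshold_index : Int) (ancestors : List (String × List String)) : List (List (List Int)) :=
  let k_max : Int := min (rank_list.length : Int) k
  let anc : List String := ((PySem.Dict.mk ancestors).get? ground_sol).getD []
  match pvLoopA ground_sol k threshold_index anc (rank_list.take k_max.toNat) 0 false false performances_tot with
  | (g, p, pt) => if !p && !g then (if k_max < k then pvAddRange pt threshold_index 2 k_max k 1 else pt) else pt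

-- ===== PORT B =====
def get_performance_measures_single_dataitem_alt (rank_list : List String) (ground_sol : String) (k : Int) (performances_tot : List (List (List Int))) (threshold_index : Int) (ancestors : List (String × List String)) : List (List (List Int)) :=
  let k_max : Int := min (rank_list.length : Int) k
  let km : Nat := k_max.toNat
  let p? : Option Nat := List.findIdx? (fun x => x == ground_sol) (rank_list.take km)
  let stop : Nat := match p? with | some p => p | none => km
  let g? : Option Nat :=
    if 0 < stop then
      let anc : List String := ((PySem.Dict.mk ancestors).get? ground_sol).getD []
      List.findIdx? (fun x => anc.contains x) (rank_list.take stop)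
    else none
  let pt1 := match p? with
    | some p => pvAddRange performances_tot threshold_index 0 (p : Int) k 1
    | none => performances_tot
  let pt2 := match g? with
    | some g => pvAddRange pt1 threshold_index 1 (g : Int) (match p? with | some p => (p : Int) | none => k) 1
    | none => pt1
  let e : Int := match g? with | some g => (g : Int) | none => match p? with | some p => (p : Int) | none => k
  pvAddRange pt2 threshold_index 2 0 e 1

-- ===== PRECONDITION & SPEC =====
-- Pre_ holds exactly when Python A returns normally: the ancestors lookup key must exist when the
-- scan reaches a non-matching element, threshold_index must be a valid (possibly negative) index,
-- the selected row must have at least k cells, and each touched cell must have the columns that are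
-- actually subscripted (3 before the first exact/ancestor hit, 2 from the first ancestor hit on,
-- otherwise 1).
def Pre_get_performance_measures_single_dataitem (rank_list : List String) (ground_sol : String) (k : Int) (performances_tot : List (List (List Int))) (threshold_index : Int) (ancestors : List (String × List String)) : Prop :=
  let xs := rank_list.take (min (rank_list.length : Int) k).toNat
  let p? := List.findIdx? (fun x => x == ground_sol) xs
  let stop := p?.getD xs.length
  (0 < stop → ((PySem.Dict.mk ancestors).get? ground_sol).isSome = true) ∧
  (1 ≤ k →
      PySem.Raise.InRange performances_tot.length threshold_index ∧
      ∀ row ∈ (PySem.List.pyGet? performances_tot threshold_index).toList,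
        k ≤ (row.length : Int) ∧
        (let anc := ((PySem.Dict.mk ancestors).get? ground_sol).getD []
         let g? := List.findIdx? (fun x => anc.contains x) (xs.take stop)
         let e : Int := match g? with
           | some g => (g : Int)
           | none => match p? with | some p => (p : Int) | none => k
         ∀ i < k.toNat,
           (if (i : Int) < e then 3 else if g?.isSome then 2 else 1) ≤ (row.getD i []).length))
instance (rank_list : List String) (ground_sol : String) (k : Int) (performances_tot : List (List (List Int))) (threshold_index : Int) (ancestors : List (String × List String)) : Decidable (Pre_get_performance_measures_single_dataitem rank_list ground_sol k performances_tot threshold_index ancestors) := by unfold Pre_get_performance_measures_single_dataitem; infer_instance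

def pvWitness_get_performance_measures_single_dataitem : List String × String × Int × List (List (List Int)) × Int × (List (String × List String)) :=
  (["b", "a"], "a", 2, [[[0, 0, 0], [0, 0, 0]]], 0, [("a", ["b"])])

def Spec_get_performance_measures_single_dataitem (rank_list : List String) (ground_sol : String) (k : Int) (performances_tot : List (List (List Int))) (threshold_index : Int) (ancestors : List (String × List String)) (out : List (List (List Int))) : Prop := out = get_performance_measures_single_dataitem_alt rank_list ground_sol k performances_tot threshold_index ancestors
instance (rank_list : List String) (ground_sol : String) (k : Int) (performances_tot : List (List (List Int))) (threshold_index : Int) (ancestors : List (String × List String)) (out : List (List (List Int))) : Decidable (Spec_get_performance_measures_single_dataitem rank_list ground_sol k performances_tot threshold_index ancestors out) := by unfold Spec_get_performance_measures_single_dataitem; infer_instance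

-- ===== CLAIM (what is proved, stated in full; the proofs are below) =====
def Claim_equal_get_performance_measures_single_dataitem : Prop := ∀ (rank_list : List String) (ground_sol : String) (k : Int) (performances_tot : List (List (List Int))) (threshold_index : Int) (ancestors : List (String × List String)), Dom_get_performance_measures_single_dataitem rank_list ground_sol k performances_tot threshold_index ancestors → Pre_get_performance_measures_single_dataitem rank_list ground_sol k performances_tot threshold_index ancestors → Spec_get_performance_measures_single_dataitem rank_list ground_sol k performances_tot threshold_index ancestors (get_performance_measures_single_dataitem rank_list ground_sol k performances_tot threshold_index ancestors)

-- ===== LEMMAS AND PROOFS =====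

theorem pvModify_comm {α : Type} (l : List α) (i j : Nat) (f g : α → α)
    (h : ∀ x, f (g x) = g (f x)) :
    (l.modify i f).modify j g = (l.modify j g).modify i f := by
  apply List.ext_getElem?
  intro n
  simp only [List.getElem?_modify]
  cases l[n]? with
  | none => rfl
  | some a => by_cases hi : i = n <;> by_cases hj : j = n <;> simp [hi, hj, h]

theorem pvModify_cancel {α : Type} (l : List α) (i : Nat) (f g : α → α)
    (h : ∀ x, g (f x) = x) :
    (l.modify i f).modify i g = l := by
  apply List.ext_getElem?
  intro n
  simp only [List.getElem?_modify]
  cases l[n]? with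
  | none => rfl
  | some a => by_cases hi : i = n <;> simp [hi, h]

theorem pvBump_length (pt : List (List (List Int))) (ti : Int) (i c : Nat) (d : Int) :
    (pvBump pt ti i c d).length = pt.length := by
  unfold pvBump
  split_ifs <;> simp [List.length_modify]

theorem pvBump_comm (pt : List (List (List Int))) (ti : Int) (i i' c c' : Nat) (d d' : Int) :
    pvBump (pvBump pt ti i c d) ti i' c' d' = pvBump (pvBump pt ti i' c' d') ti i c d := by
  conv_lhs => rw [pvBump]
  conv_rhs => rw [pvBump]
  simp only [pvBump_length]
  rw [pvBump, pvBump]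
  split_ifs with h
  · exact pvModify_comm _ _ _ _ _ (fun row => pvModify_comm _ _ _ _ _ (fun cell => pvModify_comm _ _ _ _ _ (fun x => by ring)))
  · rfl

theorem pvBump_cancel (pt : List (List (List Int))) (ti : Int) (i c : Nat) (d : Int) :
    pvBump (pvBump pt ti i c d) ti i c (-d) = pt := by
  conv_lhs => rw [pvBump]
  simp only [pvBump_length]
  rw [pvBump]
  split_ifs with h
  · exact pvModify_cancel _ _ _ _ (fun row => pvModify_cancel _ _ _ _ (fun cell => pvModify_cancel _ _ _ _ (fun x => by ring)))
  · rfl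

theorem pvBump_addRange_comm (pt : List (List (List Int))) (ti : Int) (i c c' : Nat) (a b d d' : Int) :
    pvAddRange (pvBump pt ti i c d) ti c' a b d' = pvBump (pvAddRange pt ti c' a b d') ti i c d := by
  unfold pvAddRange
  generalize PySem.List.pyRange a b 1 = l
  induction l generalizing pt with
  | nil => rfl
  | cons j l ih =>
    simp only [List.foldl_cons]
    rw [pvBump_comm]
    exact ih _

theorem pvAddRange_comm (pt : List (List (List Int))) (ti : Int) (c c' : Nat) (a b a' b' d d' : Int) :
    pvAddRange (pvAddRange pt ti c a b d) ti c' a' b' d' =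
      pvAddRange (pvAddRange pt ti c' a' b' d') ti c a b d := by
  conv_lhs => rw [pvAddRange]
  conv_rhs => rw [pvAddRange]; rw [pvAddRange]
  generalize PySem.List.pyRange a' b' 1 = l
  induction l generalizing pt with
  | nil => rfl
  | cons j l ih =>
    simp only [List.foldl_cons]
    rw [← pvBump_addRange_comm]
    exact ih _

theorem pvAddRange_nil (pt : List (List (List Int))) (ti : Int) (c : Nat) (a b d : Int) (h : b ≤ a) :
    pvAddRange pt ti c a b d = pt := by
  simp [pvAddRange, PySem.List.pyRange_one_eq_nil h]

theorem pvAddRange_cons (pt : List (List (List Int))) (ti : Int) (c : Nat) (a b d : Int) (h : a < b) :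
    pvAddRange pt ti c a b d = pvAddRange (pvBump pt ti a.toNat c d) ti c (a + 1) b d := by
  rw [pvAddRange, PySem.List.pyRange_one_cons h]
  rfl

theorem pvAddRange_append (pt : List (List (List Int))) (ti : Int) (c : Nat) (a m b d : Int)
    (h1 : a ≤ m) (h2 : m ≤ b) :
    pvAddRange pt ti c a b d = pvAddRange (pvAddRange pt ti c a m d) ti c m b d := by
  rw [pvAddRange, PySem.List.pyRange_one_append a m b h1 h2, List.foldl_append]
  rfl

theorem pvAddRange_cancel (pt : List (List (List Int))) (ti : Int) (c : Nat) (a b d : Int) :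
    pvAddRange (pvAddRange pt ti c a b d) ti c a b (-d) = pt := by
  generalize hn : (b - a).toNat = n
  induction n generalizing a pt with
  | zero =>
    have hab : b ≤ a := by omega
    rw [pvAddRange_nil _ _ _ _ _ _ hab, pvAddRange_nil _ _ _ _ _ _ hab]
  | succ n ih =>
    have hlt : a < b := by omega
    rw [pvAddRange_cons _ _ _ _ _ d hlt, pvAddRange_cons _ _ _ _ _ (-d) hlt,
      ← pvBump_addRange_comm, pvBump_cancel]
    exact ih pt (a + 1) (by omega)

theorem pvFindIdx?_lt {α : Type} (P : α → Bool) (l : List α) (i : Nat)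
    (h : List.findIdx? P l = some i) : i < l.length := by
  induction l generalizing i with
  | nil => simp [List.findIdx?_nil] at h
  | cons x rest ih =>
    rw [List.findIdx?_cons] at h
    by_cases hx : P x
    · simp [hx] at h; simp [List.length_cons]; omega
    · simp [hx] at h
      obtain ⟨j, hj, rfl⟩ := h
      simpa using ih j hj

theorem pvLoopA_general (gs : String) (k ti : Int) (anc : List String)
    (xs : List String) (i : Nat) (pt : List (List (List Int))) :
    pvLoopA gs k ti anc xs i true false pt =
      match List.findIdx? (fun x => x == gs) xs with
      | some p => (true, true,
          pvAddRange (pvAddRange pt ti 0 ((i : Int) + p) k 1) ti 1 ((i : Int) + p) k (-1))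
      | none => (true, false, pt) := by
  induction xs generalizing i pt with
  | nil => simp [pvLoopA]
  | cons x rest ih =>
    by_cases hx : x == gs
    · simp [pvLoopA, hx, List.findIdx?_cons]
    · rw [pvLoopA]
      simp only [hx, Bool.not_true, Bool.and_false, Bool.not_false,
        Bool.and_true, if_neg (Bool.false_ne_true)]
      rw [ih (i + 1) pt]
      simp only [List.findIdx?_cons, hx]
      cases hf : List.findIdx? (fun x => x == gs) rest with
      | none => simp
      | some p =>
        simp only [Option.map_some, if_neg (Bool.false_ne_true)]
        push_cast
        ring_nf

theorem pvLoopA_main (gs : String) (k ti : Int) (anc : List String)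
    (xs : List String) (i : Nat) (pt : List (List (List Int)))
    (h : (i : Int) + xs.length ≤ k) :
    pvLoopA gs k ti anc xs i false false pt =
      (let p? := List.findIdx? (fun x => x == gs) xs
       let g? := List.findIdx? (fun x => anc.contains x) (xs.take (p?.getD xs.length))
       (g?.isSome, p?.isSome,
        let e : Int := match g? with
          | some g => (i : Int) + g
          | none => match p? with | some p => (i : Int) + p | none => (i : Int) + xs.length
        let pt2 := pvAddRange pt ti 2 (i : Int) e 1
        let pt1 := match g? with
          | some g => pvAddRange pt2 ti 1 ((i : Int) + g)
              (match p? with | some p => (i : Int) + p | none => k) 1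
          | none => pt2
        match p? with
        | some p => pvAddRange pt1 ti 0 ((i : Int) + p) k 1
        | none => pt1)) := by
  induction xs generalizing i pt with
  | nil =>
    simp [pvLoopA, List.findIdx?_nil, pvAddRange_nil]
  | cons x rest ih =>
    by_cases hx : x == gs
    · simp only [pvLoopA, hx, List.findIdx?_cons]
      simp [pvAddRange_nil]
    · simp only [Bool.not_eq_true] at hx
      rw [pvLoopA]
      simp only [hx, Bool.and_true, Bool.true_and, Bool.not_false,
        Bool.false_eq_true, ite_false]
      by_cases hq : anc.contains x
      · simp only [hq, Bool.false_eq_true, ite_false, ite_true, Bool.not_true]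
        rw [pvLoopA_general]
        simp only [List.findIdx?_cons, hx, Bool.false_eq_true, ite_false]
        cases hf : List.findIdx? (fun x => x == gs) rest with
        | none =>
          simp only [Option.map_none, Option.getD_none, List.length_cons,
            List.take_succ_cons, List.take_length, List.findIdx?_cons, hq,
            ite_true, Option.isSome_some, Option.isSome_none]
          simp [pvAddRange_nil]
        | some p =>
          have hp : p < rest.length := pvFindIdx?_lt _ _ _ hf
          simp only [Option.map_some, Option.getD_some, List.take_succ_cons,
            List.findIdx?_cons, hq, ite_true,
            Option.isSome_some]
          have e1 : ((i + 1 : Nat) : Int) + (p : Int) = (i : Int) + ((p + 1 : Nat) : Int) := by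
            push_cast; ring
          rw [e1]
          rw [pvAddRange_append pt ti 1 (i : Int) ((i : Int) + ((p + 1 : Nat) : Int)) k 1
            (by push_cast; omega)
            (by simp only [List.length_cons] at h; push_cast at h ⊢; omega)]
          rw [pvAddRange_comm, pvAddRange_cancel]
          simp [pvAddRange_nil]
      · simp only [Bool.not_eq_true] at hq
        simp only [hq, Bool.false_eq_true, ite_false, Bool.not_false, ite_true]
        have h' : ((i + 1 : Nat) : Int) + rest.length ≤ k := by
          simp only [List.length_cons] at h; push_cast at h ⊢; omega
        rw [ih (i + 1) (pvBump pt ti i 2 1) h']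
        simp only [List.findIdx?_cons, hx, Bool.false_eq_true, ite_false]
        cases hf : List.findIdx? (fun x => x == gs) rest with
        | none =>
          simp only [Option.map_none, Option.getD_none, List.length_cons,
            List.take_succ_cons, List.take_length, List.findIdx?_cons, hq,
            Bool.false_eq_true, ite_false]
          cases hg : List.findIdx? (fun x => anc.contains x) rest with
          | none =>
            simp only [Option.map_none, Option.isSome_none]
            rw [pvAddRange_cons pt ti 2 (i : Int) ((i : Int) + ((rest.length + 1 : Nat) : Int)) 1
              (by push_cast; omega)]
            simp only [Int.toNat_natCast]
            push_cast
            ring_nf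
          | some g =>
            simp only [Option.map_some, Option.isSome_some]
            rw [pvAddRange_cons pt ti 2 (i : Int) ((i : Int) + ((g + 1 : Nat) : Int)) 1
              (by push_cast; omega)]
            simp only [Int.toNat_natCast]
            push_cast
            ring_nf
        | some p =>
          simp only [Option.map_some, Option.getD_some, List.take_succ_cons,
            List.findIdx?_cons, hq, Bool.false_eq_true, ite_false]
          cases hg : List.findIdx? (fun x => anc.contains x) (rest.take p) with
          | none =>
            simp only [Option.map_none, Option.isSome_none, Option.isSome_some]
            rw [pvAddRange_cons pt ti 2 (i : Int) ((i : Int) + ((p + 1 : Nat) : Int)) 1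
              (by push_cast; omega)]
            simp only [Int.toNat_natCast]
            push_cast
            ring_nf
          | some g =>
            simp only [Option.map_some, Option.isSome_some]
            rw [pvAddRange_cons pt ti 2 (i : Int) ((i : Int) + ((g + 1 : Nat) : Int)) 1
              (by push_cast; omega)]
            simp only [Int.toNat_natCast]
            push_cast
            ring_nf

-- ===== VERDICT (by name: the statement is the Claim_ definition above) =====
theorem pvAddRange_rev3 (pt : List (List (List Int))) (ti : Int) (c1 c2 c3 : Nat)
    (a1 b1 a2 b2 a3 b3 d1 d2 d3 : Int) :
    pvAddRange (pvAddRange (pvAddRange pt ti c3 a3 b3 d3) ti c2 a2 b2 d2) ti c1 a1 b1 d1 =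
    pvAddRange (pvAddRange (pvAddRange pt ti c1 a1 b1 d1) ti c2 a2 b2 d2) ti c3 a3 b3 d3 := by
  rw [pvAddRange_comm]
  rw [pvAddRange_comm pt ti c3 c1 a3 b3 a1 b1 d3 d1]
  rw [pvAddRange_comm (pvAddRange pt ti c1 a1 b1 d1) ti c3 c2 a3 b3 a2 b2 d3 d2]

theorem pv_take_take_eq (rank_list : List String) (km s : Nat) (hs : s ≤ km) :
    List.take s (List.take km rank_list) = List.take s rank_list := by
  rw [List.take_take, Nat.min_eq_left hs]

theorem get_performance_measures_single_dataitem_spec : Claim_equal_get_performance_measures_single_dataitem := by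
  unfold Claim_equal_get_performance_measures_single_dataitem
  intro rank_list gs k pt ti ancestors _dom _pre
  unfold Spec_get_performance_measures_single_dataitem
  unfold get_performance_measures_single_dataitem get_performance_measures_single_dataitem_alt
  dsimp only
  by_cases hk : min (rank_list.length : Int) k ≤ 0
  · -- no element is scanned: the loop runs on the empty prefix
    have hkm : (min (rank_list.length : Int) k).toNat = 0 := Int.toNat_of_nonpos hk
    rw [hkm, List.take_zero]
    rw [pvLoopA]  -- loop on []
    simp only [List.findIdx?_nil, List.take_zero,
      lt_irrefl, ite_false, Bool.not_false, Bool.and_self, ite_true]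
    by_cases hlt : min (rank_list.length : Int) k < k
    · have hmin : min (rank_list.length : Int) k = 0 := by omega
      rw [if_pos hlt, hmin]
    · have hmin : min (rank_list.length : Int) k = k := by omega
      rw [if_neg hlt, pvAddRange_nil pt ti 2 0 k 1 (by omega)]
  · -- at least one element scanned
    have hk0 : 0 < min (rank_list.length : Int) k := by omega
    have hkk : min (rank_list.length : Int) k ≤ k := min_le_right _ _
    set km := (min (rank_list.length : Int) k).toNat with hkmdef
    have hkm : (km : Int) = min (rank_list.length : Int) k := Int.toNat_of_nonneg (by omega)
    have hkml : km ≤ rank_list.length := by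
      have := min_le_left (rank_list.length : Int) k
      omega
    set xs := List.take km rank_list with hxsdef
    set anc := ((PySem.Dict.mk ancestors).get? gs).getD [] with hancdef
    have hlen : xs.length = km := by
      rw [hxsdef, List.length_take]
      exact Nat.min_eq_left hkml
    rw [pvLoopA_main gs k ti anc xs 0 pt (by rw [hlen]; push_cast [hkm]; omega)]
    cases hf : List.findIdx? (fun x => x == gs) xs with
    | some p =>
      have hp : p < km := by
        have := pvFindIdx?_lt _ _ _ hf
        omega
      have hpk : (p : Int) < k := by push_cast at hkm ⊢; omega
      have htk : List.take p rank_list = xs.take p := (pv_take_take_eq rank_list km p (by omega)).symm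
      have hgeq : (if 0 < p then List.findIdx? (fun x => anc.contains x) (List.take p rank_list)
          else none) = List.findIdx? (fun x => anc.contains x) (xs.take p) := by
        by_cases h0 : 0 < p
        · rw [if_pos h0, htk]
        · have : p = 0 := by omega
          subst this
          simp [List.findIdx?_nil]
      simp only [Option.getD_some, Option.isSome_some, hgeq]
      cases hg : List.findIdx? (fun x => anc.contains x) (xs.take p) with
      | some g =>
        simp only [Option.isSome_some, Bool.not_true, Bool.and_self, Bool.false_eq_true,
          ite_false, Nat.cast_zero, zero_add]
        rw [pvAddRange_rev3 pt ti 0 1 2 (p : Int) k (g : Int) (p : Int) 0 (g : Int) 1 1 1]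
      | none =>
        simp only [Option.isSome_none, Bool.not_true, Bool.not_false,
          Bool.false_and, Bool.false_eq_true, ite_false, Nat.cast_zero, zero_add]
        rw [pvAddRange_comm]
    | none =>
      have hx0 : 0 < km := by omega
      have hgeq : (if 0 < km then List.findIdx? (fun x => anc.contains x) (List.take km rank_list)
          else none) = List.findIdx? (fun x => anc.contains x) (xs.take xs.length) := by
        rw [if_pos hx0, List.take_length, hxsdef]
      simp only [Option.getD_none, Option.isSome_none, hgeq]
      cases hg : List.findIdx? (fun x => anc.contains x) (xs.take xs.length) with
      | some g =>
        simp only [Option.isSome_some, Bool.not_true, Bool.not_false, Bool.and_false,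
          Bool.false_eq_true, ite_false, Nat.cast_zero, zero_add]
        rw [pvAddRange_comm]
      | none =>
        simp only [Option.isSome_none, Bool.not_false, Bool.and_self, ite_true,
          Nat.cast_zero, zero_add, hlen, hkm]
        by_cases hlt : min (rank_list.length : Int) k < k
        · rw [if_pos hlt]
          rw [← pvAddRange_append pt ti 2 0 (min (rank_list.length : Int) k) k 1 (by omega) (by omega)]
        · rw [if_neg hlt]
          have : min (rank_list.length : Int) k = k := by omega
          rw [this]
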